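-- pv_equiv track=rewrite | github.com/asgore-undertale/Week-Program-System | pyscripts/week_generator.py | get_hours_space_between_year
-- ===== SOURCE A (Python) =====
-- def get_hours_space_between_year(week, day, year, test_hours=[]):
--     distance_from_same_year_counter = 0
--     distance_from_same_year_counter_temp = None
--
--     for hour in week[day]:
--         for lec in week[day][hour]:
--             if lec["year"] == year or hour in test_hours:
--                 if distance_from_same_year_counter_temp is not None:
--                     distance_from_same_year_counter += distance_from_same_year_counter_temp
--
--                 distance_from_same_year_counter_temp = 0
--
--                 break
--
--         else:
--             if distance_from_same_year_counter_temp is not None: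
--                 distance_from_same_year_counter_temp += 1
--
--     return distance_from_same_year_counter
-- ===== SOURCE B (Python) =====
-- def get_hours_space_between_year(week, day, year, test_hours=[]):
--     positions = [i for i, hour in enumerate(week[day])
--                  if any(lec["year"] == year or hour in test_hours
--                         for lec in week[day][hour])]
--     if not positions:
--         return 0
--     return positions[-1] - positions[0] - (len(positions) - 1)
-- ===== Notes on version B (the rewrite author's own statement) =====
-- stated objective: simpler
-- what changed: Replaces A's stateful counter/temp-None accumulator with a for/else inner loop by a one-pass comprehension collecting the indices of matching hours and the closed form last - first - (count - 1).
import Mathlib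
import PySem

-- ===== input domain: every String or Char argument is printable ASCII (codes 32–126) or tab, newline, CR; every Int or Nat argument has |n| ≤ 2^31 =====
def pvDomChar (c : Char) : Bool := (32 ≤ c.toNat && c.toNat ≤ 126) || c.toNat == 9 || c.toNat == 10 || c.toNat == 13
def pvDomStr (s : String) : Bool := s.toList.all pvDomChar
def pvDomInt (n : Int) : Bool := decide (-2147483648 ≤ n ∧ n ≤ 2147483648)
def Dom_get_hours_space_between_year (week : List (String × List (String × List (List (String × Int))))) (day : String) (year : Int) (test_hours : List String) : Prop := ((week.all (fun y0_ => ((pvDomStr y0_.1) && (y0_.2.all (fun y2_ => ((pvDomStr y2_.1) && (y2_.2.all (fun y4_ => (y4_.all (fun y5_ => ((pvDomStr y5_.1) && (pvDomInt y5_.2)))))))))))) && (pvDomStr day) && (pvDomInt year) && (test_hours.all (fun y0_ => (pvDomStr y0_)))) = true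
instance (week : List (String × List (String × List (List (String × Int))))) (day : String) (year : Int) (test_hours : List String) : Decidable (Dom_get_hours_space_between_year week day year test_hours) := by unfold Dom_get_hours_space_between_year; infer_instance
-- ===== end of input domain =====

-- B replaces A's stateful temp/None accumulator with match-position collection and the
-- closed form last - first - (count - 1); objective: simpler (same asymptotic cost).

-- ===== PORT A =====
-- inner 'for lec in week[day][hour]: if lec["year"] == year or hour in test_hours: … break'
-- (the matched/broke outcome of the loop; missing "year" key is a KeyError, excluded by Pre_)
def pvAScan (year : Int) (inTest : Bool) : List (List (String × Int)) → Bool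
  | [] => false
  | lec :: rest =>
      if ((List.lookup "year" lec).getD 0 == year) || inTest then true
      else pvAScan year inTest rest

def get_hours_space_between_year (week : List (String × List (String × List (List (String × Int))))) (day : String) (year : Int) (test_hours : List String) : Int :=
  let hours := (List.lookup day week).getD []
  (hours.foldl (fun st p =>
      if pvAScan year (test_hours.contains p.1) ((List.lookup p.1 hours).getD []) then
        (st.1 + st.2.getD 0, some (0 : Int))
      else
        (st.1, st.2.map (· + 1)))
    ((0 : Int), (none : Option Int))).1

-- ===== PORT B =====
def get_hours_space_between_year_alt (week : List (String × List (String × List (List (String × Int))))) (day : String) (year : Int) (test_hours : List String) : Int :=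
  let hours := (List.lookup day week).getD []
  let positions := ((PySem.List.enumerate hours).filter (fun q =>
      ((List.lookup q.2.1 hours).getD []).any (fun lec =>
        ((List.lookup "year" lec).getD 0 == year) || test_hours.contains q.2.1))).map (·.1)
  if positions.isEmpty then 0
  else positions.getLastD 0 - positions.headD 0 - ((positions.length : Int) - 1)

-- ===== PRECONDITION & SPEC =====
-- does this lecture dict stop A's inner scan (lec["year"] == year or hour in test_hours)?
def pvStops (year : Int) (inTest : Bool) (lec : List (String × Int)) : Bool :=
  match List.lookup "year" lec with
  | none => false
  | some v => (v == year) || inTest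

-- Pre_ excludes exactly the inputs where Python A raises KeyError: a day absent from week,
-- or a lecture dict without a "year" key that A's left-to-right scan reaches (i.e. that is
-- not preceded, within its hour, by a lecture that already matched).
def Pre_get_hours_space_between_year (week : List (String × List (String × List (List (String × Int))))) (day : String) (year : Int) (test_hours : List String) : Prop :=
  (List.lookup day week).isSome = true ∧
  ∀ p ∈ (List.lookup day week).getD [],
    ∀ i < ((List.lookup p.1 ((List.lookup day week).getD [])).getD []).length,
      (∀ j < i, pvStops year (test_hours.contains p.1)
          (((List.lookup p.1 ((List.lookup day week).getD [])).getD []).getD j []) = false) →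
      (List.lookup "year"
          (((List.lookup p.1 ((List.lookup day week).getD [])).getD []).getD i [])).isSome = true
instance (week : List (String × List (String × List (List (String × Int))))) (day : String) (year : Int) (test_hours : List String) : Decidable (Pre_get_hours_space_between_year week day year test_hours) := by unfold Pre_get_hours_space_between_year; infer_instance

def pvWitness_get_hours_space_between_year : (List (String × List (String × List (List (String × Int))))) × String × Int × List String :=
  ([("mon", [("8", [[("year", 1)]]), ("9", []), ("10", [[("year", 1)]])])], "mon", 1, [])

def Spec_get_hours_space_between_year (week : List (String × List (String × List (List (String × Int))))) (day : String) (year : Int) (test_hours : List String) (out : Int) : Prop := out = get_hours_space_between_year_alt week day year test_hours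
instance (week : List (String × List (String × List (List (String × Int))))) (day : String) (year : Int) (test_hours : List String) (out : Int) : Decidable (Spec_get_hours_space_between_year week day year test_hours out) := by unfold Spec_get_hours_space_between_year; infer_instance

-- ===== CLAIM (what is proved, stated in full; the proofs are below) =====
def Claim_equal_get_hours_space_between_year : Prop := ∀ (week : List (String × List (String × List (List (String × Int))))) (day : String) (year : Int) (test_hours : List String), Dom_get_hours_space_between_year week day year test_hours → Pre_get_hours_space_between_year week day year test_hours → Spec_get_hours_space_between_year week day year test_hours (get_hours_space_between_year week day year test_hours)

-- ===== LEMMAS AND PROOFS =====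

theorem pvWitness_ok :
    Dom_get_hours_space_between_year (pvWitness_get_hours_space_between_year.1) (pvWitness_get_hours_space_between_year.2.1) (pvWitness_get_hours_space_between_year.2.2.1) (pvWitness_get_hours_space_between_year.2.2.2) ∧
    Pre_get_hours_space_between_year (pvWitness_get_hours_space_between_year.1) (pvWitness_get_hours_space_between_year.2.1) (pvWitness_get_hours_space_between_year.2.2.1) (pvWitness_get_hours_space_between_year.2.2.2) := by
  decide

-- A's inner scan has the same value as B's 'any' (inTest is constant over the list)
theorem pvAScan_eq_any (year : Int) (b : Bool) (l : List (List (String × Int))) :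
    pvAScan year b l = l.any (fun lec => ((List.lookup "year" lec).getD 0 == year) || b) := by
  induction l with
  | nil => rfl
  | cons lec rest ih =>
      simp only [pvAScan, List.any_cons]
      cases h : ((List.lookup "year" lec).getD 0 == year) || b <;> simp_all

-- relative (0-based) indices of the elements satisfying f
def posIdx {α : Type} (f : α → Bool) : List α → List Int
  | [] => []
  | a :: l => if f a then 0 :: (posIdx f l).map (· + 1) else (posIdx f l).map (· + 1)

theorem posIdx_eq_enum {α : Type} (f : α → Bool) (l : List α) : ∀ (s : Int),
    ((PySem.List.enumerate l s).filter (fun q => f q.2)).map (·.1)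
      = (posIdx f l).map (· + s) := by
  induction l with
  | nil => intro s; simp [PySem.List.enumerate_nil, posIdx]
  | cons a l ih =>
      intro s
      have hc : ∀ (m : List Int), (m.map (· + 1)).map (· + s) = m.map (· + (s + 1)) := by
        intro m
        rw [List.map_map]
        apply List.map_congr_left
        intro x _
        simp only [Function.comp_apply]
        ring
      rw [PySem.List.enumerate_cons]
      by_cases h : f a
      · simp [h, posIdx, ih (s + 1), hc]
      · simp [h, posIdx, ih (s + 1), hc]

theorem getLastD_map_add_one (l : List Int) : ∀ (d : Int),
    (l.map (· + 1)).getLastD (d + 1) = l.getLastD d + 1 := by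
  induction l with
  | nil => intro d; rfl
  | cons x xs ih =>
      intro d
      simp only [List.map_cons, List.getLastD_cons]
      exact ih x

-- the value B computes from a list of match positions
def pvValB (ps : List Int) : Int :=
  if ps.isEmpty then 0 else ps.getLastD 0 - ps.headD 0 - ((ps.length : Int) - 1)

-- the value A's loop still adds when it starts with temp = some t
def pvValS (t : Int) (ps : List Int) : Int :=
  if ps.isEmpty then 0 else t + ps.getLastD 0 - ((ps.length : Int) - 1)

theorem foldA_characterize {α : Type} (f : α → Bool) : ∀ (l : List α) (c : Int) (t? : Option Int),
    (l.foldl (fun st a =>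
        if f a then (st.1 + st.2.getD 0, some (0 : Int))
        else (st.1, st.2.map (· + 1))) (c, t?)).1
      = c + (match t? with
             | none => pvValB (posIdx f l)
             | some t => pvValS t (posIdx f l)) := by
  intro l
  induction l with
  | nil =>
      intro c t?
      cases t? <;> simp [pvValB, pvValS, posIdx]
  | cons a l ih =>
      intro c t?
      simp only [List.foldl_cons]
      by_cases h : f a
      · simp only [h, if_true]
        rw [ih]
        cases t? with
        | none =>
            simp only [posIdx, h, if_true, Option.getD_none, add_zero]
            cases hp : posIdx f l with
            | nil => simp [pvValB, pvValS]
            | cons q qs =>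
                simp only [pvValB, pvValS, List.map_cons, List.isEmpty_cons, List.headD_cons,
                  List.length_cons, List.length_map, if_false, Bool.false_eq_true]
                have := getLastD_map_add_one qs q
                simp only [List.getLastD_cons] at *
                rw [this]
                push_cast
                ring
        | some t =>
            simp only [posIdx, h, if_true, Option.getD_some]
            cases hp : posIdx f l with
            | nil => simp [pvValS]
            | cons q qs =>
                simp only [pvValS, List.map_cons, List.isEmpty_cons,
                  List.length_cons, List.length_map, if_false, Bool.false_eq_true]
                have := getLastD_map_add_one qs q
                simp only [List.getLastD_cons] at *
                rw [this]
                push_cast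
                ring
      · simp only [h, if_false, Bool.false_eq_true]
        cases t? with
        | none =>
            simp only [Option.map_none]
            rw [ih]
            simp only [posIdx, h, if_false, Bool.false_eq_true]
            cases hp : posIdx f l with
            | nil => simp [pvValB]
            | cons q qs =>
                simp only [pvValB, List.map_cons, List.isEmpty_cons, List.headD_cons,
                  List.length_cons, List.length_map, if_false, Bool.false_eq_true]
                have := getLastD_map_add_one qs q
                simp only [List.getLastD_cons] at *
                rw [this]
                push_cast
                ring
        | some t =>
            simp only [Option.map_some]
            rw [ih]
            simp only [posIdx, h, if_false, Bool.false_eq_true]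
            cases hp : posIdx f l with
            | nil => simp [pvValS]
            | cons q qs =>
                simp only [pvValS, List.map_cons, List.isEmpty_cons,
                  List.length_cons, List.length_map, if_false, Bool.false_eq_true]
                have := getLastD_map_add_one qs q
                simp only [List.getLastD_cons] at *
                rw [this]
                push_cast
                ring

theorem map_add_zero_int (l : List Int) : l.map (· + 0) = l := by
  simp

-- ===== VERDICT (by name: the statement is the Claim_ definition above) =====
theorem get_hours_space_between_year_spec : Claim_equal_get_hours_space_between_year := by
  intro week day year test_hours _hDom _hPre
  unfold Spec_get_hours_space_between_year
  unfold get_hours_space_between_year get_hours_space_between_year_alt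
  dsimp only
  generalize (List.lookup day week).getD [] = hours
  have hstep : (fun (st : Int × Option Int) (p : String × List (List (String × Int))) =>
      if pvAScan year (test_hours.contains p.1) ((List.lookup p.1 hours).getD []) then
        (st.1 + st.2.getD 0, some (0 : Int))
      else (st.1, st.2.map (· + 1)))
      = (fun st p => if ((List.lookup p.1 hours).getD []).any (fun lec =>
            ((List.lookup "year" lec).getD 0 == year) || test_hours.contains p.1) then
          (st.1 + st.2.getD 0, some (0 : Int))
        else (st.1, st.2.map (· + 1))) := by
    funext st p
    rw [pvAScan_eq_any]
  rw [hstep, foldA_characterize (fun p => ((List.lookup p.1 hours).getD []).any (fun lec =>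
        ((List.lookup "year" lec).getD 0 == year) || test_hours.contains p.1)) hours 0 none]
  have henum := posIdx_eq_enum (fun (p : String × List (List (String × Int))) =>
      ((List.lookup p.1 hours).getD []).any (fun lec =>
        ((List.lookup "year" lec).getD 0 == year) || test_hours.contains p.1)) hours 0
  rw [map_add_zero_int] at henum
  rw [henum, zero_add]
  rfl
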